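-- pv_equiv track=rewrite | github.com/sairambokka/TIP-102-1a | Week-2/find_balanced_subsequence.py | find_balanced_subsequence
-- ===== SOURCE A (Python) =====
-- def find_balanced_subsequence(art_pieces):
--     count = {}
--
--     for num in art_pieces:
--         count[num] = count.get(num, 0) + 1
--
--     max_value = 0
--     for key, value in count.items():
--         if (key+1) in count:
--             max_value = max(max_value, (value+count[key+1]))
--
--     return max_value
-- ===== SOURCE B (Python) =====
-- def find_balanced_subsequence(art_pieces):
--     count = {}
--     for num in art_pieces:
--         count[num] = count.get(num, 0) + 1
--     keys = sorted(count)
--     best = 0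
--     for k, nxt in zip(keys, keys[1:]):
--         if nxt == k + 1:
--             best = max(best, count[k] + count[nxt])
--     return best
-- ===== Notes on version B (the rewrite author's own statement) =====
-- stated objective: alternative
-- what changed: Replaces A's hashed (key+1)-membership test over dict items by sorting the distinct values once and scanning adjacent pairs of the sorted keys, taking count[k]+count[k+1] exactly when the next sorted key is k+1.
import Mathlib
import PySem

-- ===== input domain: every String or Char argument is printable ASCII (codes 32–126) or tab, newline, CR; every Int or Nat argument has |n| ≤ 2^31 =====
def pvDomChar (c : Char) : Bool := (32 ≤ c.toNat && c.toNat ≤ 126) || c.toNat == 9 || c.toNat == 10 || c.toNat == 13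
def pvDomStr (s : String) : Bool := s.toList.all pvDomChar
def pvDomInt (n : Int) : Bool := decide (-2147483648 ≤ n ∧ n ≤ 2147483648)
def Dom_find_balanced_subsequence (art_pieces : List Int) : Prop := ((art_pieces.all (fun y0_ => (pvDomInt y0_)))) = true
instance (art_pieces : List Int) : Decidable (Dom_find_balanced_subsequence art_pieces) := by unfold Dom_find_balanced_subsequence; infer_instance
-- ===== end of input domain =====

-- B replaces A's hashed (key+1)-membership scan over the dict items by a single
-- ordered adjacency scan over the sorted distinct values (objective: alternative).

-- ===== PORT A =====
-- count[key+1] is ported as getD: exact here, the 'in count' guard guarantees the key is present.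
def find_balanced_subsequence (art_pieces : List Int) : Int :=
  let count := art_pieces.foldl (fun d num => d.insert num (d.getD num 0 + 1)) PySem.Dict.empty
  count.items.foldl (fun max_value kv =>
    if count.contains (kv.1 + 1) then max max_value (kv.2 + count.getD (kv.1 + 1) 0)
    else max_value) 0

-- ===== PORT B =====
-- count[k] / count[nxt] ported as getD: exact, both are keys of count.
def find_balanced_subsequence_alt (art_pieces : List Int) : Int :=
  let count := art_pieces.foldl (fun d num => d.insert num (d.getD num 0 + 1)) PySem.Dict.empty
  let keys := PySem.List.sorted count.keys (fun k => k) false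
  (keys.zip (keys.drop 1)).foldl (fun best p =>
    if p.2 == p.1 + 1 then max best (count.getD p.1 0 + count.getD p.2 0) else best) 0

-- ===== PRECONDITION & SPEC =====
def Spec_find_balanced_subsequence (art_pieces : List Int) (out : Int) : Prop := out = find_balanced_subsequence_alt art_pieces
instance (art_pieces : List Int) (out : Int) : Decidable (Spec_find_balanced_subsequence art_pieces out) := by unfold Spec_find_balanced_subsequence; infer_instance

-- ===== CLAIM (what is proved, stated in full; the proofs are below) =====
def Claim_equal_find_balanced_subsequence : Prop := ∀ (art_pieces : List Int), Dom_find_balanced_subsequence art_pieces → Spec_find_balanced_subsequence art_pieces (find_balanced_subsequence art_pieces)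

-- ===== LEMMAS AND PROOFS =====

-- In a strictly increasing list, the pairs of the self-zip that differ by 1 are
-- exactly the elements whose successor is in the list.
lemma adj_filter : ∀ (L : List Int), L.Pairwise (· < ·) →
    ((L.zip (L.drop 1)).filter (fun p => p.2 == p.1 + 1)).map (·.1)
      = L.filter (fun k => decide (k + 1 ∈ L))
  | [], _ => by simp
  | [a], _ => by simp
  | a :: b :: t, h => by
    have hpc := List.pairwise_cons.1 h
    have hab : a < b := hpc.1 b (by simp)
    have halt : ∀ x ∈ b :: t, a < x := hpc.1
    have h' : (b :: t).Pairwise (· < ·) := hpc.2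
    have hbt : ∀ x ∈ t, b < x := (List.pairwise_cons.1 h').1
    have ih := adj_filter (b :: t) h'
    have hhead : decide (a + 1 ∈ a :: b :: t) = (b == a + 1) := by
      by_cases hb : b = a + 1
      · simp [hb]
      · have hnt : a + 1 ∉ t := by
          intro hx; have := hbt _ hx; omega
        have hnotin : a + 1 ∉ a :: b :: t := by
          simp only [List.mem_cons]
          rintro (h1 | h1 | h1)
          · omega
          · exact hb h1.symm
          · exact hnt h1
        simp [hnotin, hb]
    have htail : ∀ k ∈ b :: t,
        decide (k + 1 ∈ a :: b :: t) = decide (k + 1 ∈ b :: t) := by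
      intro k hk
      have hak : a < k := halt k hk
      simp only [List.mem_cons, decide_eq_decide]
      constructor
      · rintro (hka | hrest)
        · omega
        · exact hrest
      · intro hrest; exact Or.inr hrest
    have hzip : (a :: b :: t).zip ((a :: b :: t).drop 1) = (a, b) :: (b :: t).zip t := by
      simp
    have hdrop : (b :: t).drop 1 = t := rfl
    rw [hdrop] at ih
    rw [hzip, List.filter_cons, List.filter_cons, hhead,
        List.filter_congr htail, ← ih]
    by_cases hb : (b == a + 1) = true
    · simp [hb]
    · simp only [hb, if_neg, Bool.false_eq_true, not_false_iff]

lemma ports_agree (xs : List Int) :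
    find_balanced_subsequence xs = find_balanced_subsequence_alt xs := by
  simp only [find_balanced_subsequence, find_balanced_subsequence_alt]
  rw [PySem.Dict.foldl_insert_getD_add_one_eq_counter]
  rw [PySem.Dict.items_counter, PySem.Dict.keys_counter]
  set S := PySem.Set.ofList xs with hS
  set L := PySem.List.sorted S (fun k => k) false with hL
  -- order facts about L
  have hperm : L.Perm S := PySem.List.sorted_perm S (fun k => k) false
  have hnd : L.Nodup := hperm.nodup_iff.mpr (PySem.Set.nodup_ofList xs)
  have hle : L.Pairwise (fun a b => a ≤ b) := PySem.List.sorted_pairwise S (fun k => k)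
  have hlt : L.Pairwise (· < ·) :=
    (hle.and hnd).imp (fun h => lt_of_le_of_ne h.1 h.2)
  -- A side: fold over items = fold over distinct values, then over the filtered list
  rw [List.foldl_map]
  simp only [PySem.Dict.contains_counter, PySem.Dict.getD_counter]
  rw [PySem.List.foldl_if_eq_foldl_filter (fun k => xs.contains (k + 1))
    (fun mv k => max mv ((xs.count k : Int) + (xs.count (k + 1) : Int)))]
  -- B side: fold over adjacent sorted pairs = fold over the filtered pair list
  rw [PySem.List.foldl_if_eq_foldl_filter (fun p : Int × Int => p.2 == p.1 + 1)
    (fun best p => max best ((xs.count p.1 : Int) + (xs.count p.2 : Int)))]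
  -- on the filtered pairs, the second component is the successor of the first
  rw [PySem.List.foldl_congr_mem _ _
      (fun best (p : Int × Int) => max best ((xs.count p.1 : Int) + (xs.count (p.1 + 1) : Int))) _
      (by
        intro acc p hp
        have := (List.mem_filter.1 hp).2
        have hp2 : p.2 = p.1 + 1 := by simpa using this
        rw [hp2])]
  rw [← List.foldl_map (f := fun p : Int × Int => p.1)
      (g := fun best k => max best ((xs.count k : Int) + (xs.count (k + 1) : Int)))]
  rw [adj_filter L hlt]
  -- membership in L is membership in xs
  have hmem : ∀ k ∈ L, (decide (k + 1 ∈ L)) = xs.contains (k + 1) := by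
    intro k _
    have : (k + 1 ∈ L) ↔ (k + 1 ∈ xs) := by
      rw [hperm.mem_iff, hS, PySem.Set.mem_ofList]
    simp [this]
  rw [List.filter_congr hmem]
  -- the two filtered lists are permutations; the running max ignores order
  haveI : RightCommutative
      (fun (mv k : Int) => max mv ((xs.count k : Int) + (xs.count (k + 1) : Int))) :=
    ⟨fun b a1 a2 => max_right_comm b _ _⟩
  exact ((hperm.filter _).foldl_eq 0).symm

-- ===== VERDICT (by name: the statement is the Claim_ definition above) =====
theorem find_balanced_subsequence_spec : Claim_equal_find_balanced_subsequence := by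
  intro xs _
  unfold Spec_find_balanced_subsequence
  exact ports_agree xs
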